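-- pv_equiv track=rewrite | github.com/tsumagariDX/PRACTICE | sales_report.py | get_top_category
-- ===== SOURCE A (Python) =====
-- def get_top_category(category_sales):
--     max_sales = 0
--     max_sales_category = ""
--     for category in category_sales:
--         if category_sales[category] > max_sales:
--             max_sales = category_sales[category]
--             max_sales_category = category
--     return max_sales_category
-- ===== SOURCE B (Python) =====
-- def get_top_category(category_sales):
--     m = max(category_sales.values(), default=0)
--     if m <= 0:
--         return ""
--     return next(k for k, v in category_sales.items() if v == m)
-- ===== Notes on version B (the rewrite author's own statement) =====
-- stated objective: alternative
-- what changed: Replaces A's single fused scan carrying a (max, argmax-category) pair with a two-phase decomposition: first take the maximum of the values (max with default 0), then, if it is positive, return the first category holding that value via a generator search.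
import Mathlib
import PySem

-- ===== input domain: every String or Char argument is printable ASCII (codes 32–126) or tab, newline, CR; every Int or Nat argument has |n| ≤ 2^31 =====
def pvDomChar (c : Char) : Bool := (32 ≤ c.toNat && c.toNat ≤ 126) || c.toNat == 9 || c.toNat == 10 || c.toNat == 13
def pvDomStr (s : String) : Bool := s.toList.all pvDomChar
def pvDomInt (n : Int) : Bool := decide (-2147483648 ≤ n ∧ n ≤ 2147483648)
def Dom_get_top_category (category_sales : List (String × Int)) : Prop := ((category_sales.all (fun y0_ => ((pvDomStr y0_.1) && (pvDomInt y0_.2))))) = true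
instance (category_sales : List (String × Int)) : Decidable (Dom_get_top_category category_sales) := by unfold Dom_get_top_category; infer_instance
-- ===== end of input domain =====

-- B changes the decomposition only (two passes: max of values, then first match) — return value proved equal; no speed claim.

-- ===== PORT A =====
-- A iterates the dict's keys keeping a running (max_sales, max_sales_category) pair, strict '>' so first max wins.
def get_top_category (category_sales : List (String × Int)) : String :=
  let d := PySem.Dict.ofList category_sales
  (d.keys.foldl
    (fun (st : Int × String) category =>
      if d.getD category 0 > st.1 then (d.getD category 0, category) else st)
    (0, "")).2

-- ===== PORT B =====
-- B: m = max(values, default=0); if m <= 0 return ""; else first item whose value equals m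
-- (the .getD "" only totalises the 'next(...)' search, which is never empty when m > 0).
def get_top_category_alt (category_sales : List (String × Int)) : String :=
  let d := PySem.Dict.ofList category_sales
  let m := (PySem.List.max? d.values (fun v => v)).getD 0
  if m ≤ 0 then ""
  else ((d.items.find? (fun p => p.2 == m)).map Prod.fst).getD ""

-- ===== PRECONDITION & SPEC =====
def Spec_get_top_category (category_sales : List (String × Int)) (out : String) : Prop := out = get_top_category_alt category_sales
instance (category_sales : List (String × Int)) (out : String) : Decidable (Spec_get_top_category category_sales out) := by unfold Spec_get_top_category; infer_instance

-- ===== CLAIM (what is proved, stated in full; the proofs are below) =====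
def Claim_equal_get_top_category : Prop := ∀ (category_sales : List (String × Int)), Dom_get_top_category category_sales → Spec_get_top_category category_sales (get_top_category category_sales)

-- ===== LEMMAS AND PROOFS =====

-- running max of the values of l seeded with m
def pvMaxv (m : Int) (l : List (String × Int)) : Int :=
  l.foldl (fun a p => max a p.2) m

theorem pvMaxv_le (l : List (String × Int)) (m : Int) : m ≤ pvMaxv m l := by
  induction l generalizing m with
  | nil => simp [pvMaxv]
  | cons p t ih =>
    have := ih (max m p.2)
    simp only [pvMaxv, List.foldl_cons] at *
    exact le_trans (le_max_left m p.2) this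

theorem pvVal_le_maxv (l : List (String × Int)) (m : Int) :
    ∀ p ∈ l, p.2 ≤ pvMaxv m l := by
  induction l generalizing m with
  | nil => intro p hp; cases hp
  | cons q t ih =>
    intro p hp
    rcases List.mem_cons.mp hp with hp | hp
    · subst hp
      have := pvMaxv_le t (max m p.2)
      simp only [pvMaxv, List.foldl_cons]
      exact le_trans (le_max_right m p.2) this
    · exact ih (max m q.2) p hp

theorem pvMaxv_exists (l : List (String × Int)) (m : Int) :
    pvMaxv m l = m ∨ ∃ p ∈ l, p.2 = pvMaxv m l := by
  induction l generalizing m with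
  | nil => left; rfl
  | cons q t ih =>
    rcases ih (max m q.2) with h | h
    · simp only [pvMaxv, List.foldl_cons] at *
      by_cases hle : q.2 ≤ m
      · left; rw [h]; exact max_eq_left hle
      · right; exact ⟨q, List.mem_cons_self, by rw [h]; exact (max_eq_right (by omega)).symm⟩
    · right
      obtain ⟨p, hp, hv⟩ := h
      exact ⟨p, List.mem_cons_of_mem q hp, hv⟩

-- A's fused fold, characterised: the final max is pvMaxv, and the final category is the
-- first item attaining it (kept default c when the seed m was never beaten).
theorem pvFoldA_spec (l : List (String × Int)) (m : Int) (c : String) :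
    l.foldl (fun (st : Int × String) p => if p.2 > st.1 then (p.2, p.1) else st) (m, c)
      = (pvMaxv m l,
         if pvMaxv m l = m then c
         else ((l.find? (fun p => p.2 == pvMaxv m l)).map Prod.fst).getD c) := by
  induction l generalizing m c with
  | nil => simp [pvMaxv]
  | cons q t ih =>
    simp only [List.foldl_cons]
    by_cases hq : q.2 > m
    · rw [if_pos hq, ih]
      have hmax : max m q.2 = q.2 := max_eq_right hq.le
      have hM : pvMaxv m (q :: t) = pvMaxv q.2 t := by
        simp [pvMaxv, hmax]
      have hge : q.2 ≤ pvMaxv q.2 t := pvMaxv_le t q.2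
      have hMne : pvMaxv m (q :: t) ≠ m := by
        rw [hM]; intro h; omega
      rw [if_neg hMne]
      rw [hM]
      by_cases he : pvMaxv q.2 t = q.2
      · -- the head already attains the overall max: find? stops at q
        have hfind : (q :: t).find? (fun p => p.2 == pvMaxv q.2 t) = some q := by
          rw [List.find?_cons_of_pos]
          simp [he]
        rw [he] at hfind
        rw [he, if_pos rfl, hfind]
        simp
      · -- the max lies strictly inside t: find? skips q, and t contains a witness
        rcases pvMaxv_exists t q.2 with h0 | h0
        · exact absurd h0 he
        obtain ⟨p, hp, hv⟩ := h0
        have hfs : (t.find? (fun p => p.2 == pvMaxv q.2 t)).isSome := by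
          rw [List.find?_isSome]
          exact ⟨p, hp, by simp [hv]⟩
        obtain ⟨r, hr⟩ := Option.isSome_iff_exists.mp hfs
        have hqne : q.2 ≠ pvMaxv q.2 t := fun h => he h.symm
        have hfind : (q :: t).find? (fun p => p.2 == pvMaxv q.2 t)
            = t.find? (fun p => p.2 == pvMaxv q.2 t) := by
          rw [List.find?_cons_of_neg]
          simp [hqne]
        rw [if_neg he, hfind, hr]
        simp
    · rw [if_neg hq, ih]
      have hmax : max m q.2 = m := max_eq_left (by omega)
      have hM : pvMaxv m (q :: t) = pvMaxv m t := by
        simp [pvMaxv, hmax]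
      by_cases he : pvMaxv m t = m
      · rw [hM, he, if_pos rfl, if_pos rfl]
      · rcases pvMaxv_exists t m with h0 | h0
        · exact absurd h0 he
        obtain ⟨p, hp, hv⟩ := h0
        have hqne : q.2 ≠ pvMaxv m t := by
          have h1 := pvMaxv_le t m
          intro h
          omega
        have hfind : (q :: t).find? (fun p => p.2 == pvMaxv m t)
            = t.find? (fun p => p.2 == pvMaxv m t) := by
          rw [List.find?_cons_of_neg]
          simp [hqne]
        rw [hM, if_neg he, if_neg he, hfind]

-- the two programs agree on any dict with unique keys
theorem pvMain (d : PySem.Dict String Int) (hnd : d.keys.Nodup) :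
    (d.keys.foldl
      (fun (st : Int × String) category =>
        if d.getD category 0 > st.1 then (d.getD category 0, category) else st)
      (0, "")).2
    = (if (PySem.List.max? d.values (fun v => v)).getD 0 ≤ 0 then ""
       else ((d.items.find? (fun p => p.2 == (PySem.List.max? d.values (fun v => v)).getD 0)).map Prod.fst).getD "") := by
  have hitems : d.items = d.keys.map (fun k => (k, d.getD k 0)) :=
    PySem.Dict.items_eq_map_keys d hnd 0
  have hA : d.keys.foldl
      (fun (st : Int × String) category =>
        if d.getD category 0 > st.1 then (d.getD category 0, category) else st) (0, "")
      = d.items.foldl (fun (st : Int × String) p => if p.2 > st.1 then (p.2, p.1) else st) (0, "") := by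
    rw [hitems, List.foldl_map]
  rw [hA, pvFoldA_spec]
  have hvals : d.values = d.items.map (fun p => p.2) := rfl
  by_cases hM : pvMaxv 0 d.items = 0
  · -- no positive value: A keeps "", and B's m is ≤ 0
    rw [if_pos hM]
    have hm : (PySem.List.max? d.values (fun v => v)).getD 0 ≤ 0 := by
      cases hmx : PySem.List.max? d.values (fun v => v) with
      | none => simp
      | some v =>
        have hv := PySem.List.max?_mem hmx
        rw [hvals, List.mem_map] at hv
        obtain ⟨p, hp, hpv⟩ := hv
        have := pvVal_le_maxv d.items 0 p hp
        simp only [Option.getD_some]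
        omega
    rw [if_pos hm]
  · -- positive overall max: B's m equals pvMaxv 0 d.items, branches coincide
    have hpos : 0 < pvMaxv 0 d.items :=
      lt_of_le_of_ne (pvMaxv_le d.items 0) (Ne.symm hM)
    rcases pvMaxv_exists d.items 0 with h0 | h0
    · exact absurd h0 hM
    obtain ⟨p, hp, hpv⟩ := h0
    have hmem : p.2 ∈ d.values := by
      rw [hvals, List.mem_map]; exact ⟨p, hp, rfl⟩
    cases hmx : PySem.List.max? d.values (fun v => v) with
    | none =>
      rw [PySem.List.max?_eq_none_iff] at hmx
      rw [hmx] at hmem; cases hmem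
    | some v =>
      have hle : p.2 ≤ v := PySem.List.max?_isMax hmx p.2 hmem
      have hvmem := PySem.List.max?_mem hmx
      rw [hvals, List.mem_map] at hvmem
      obtain ⟨q, hq, hqv⟩ := hvmem
      have hvle : v ≤ pvMaxv 0 d.items := hqv ▸ pvVal_le_maxv d.items 0 q hq
      have hveq : v = pvMaxv 0 d.items := le_antisymm hvle (hpv ▸ hle)
      rw [if_neg hM]
      simp only [Option.getD_some, hveq]
      rw [if_neg (by omega)]


-- ===== VERDICT (by name: the statement is the Claim_ definition above) =====
theorem get_top_category_spec : Claim_equal_get_top_category := by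
  intro cs _dom
  unfold Spec_get_top_category
  simp only [get_top_category, get_top_category_alt]
  exact pvMain (PySem.Dict.ofList cs) (PySem.Dict.nodup_keys_ofList cs)
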